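-- pv_equiv track=rewrite | github.com/velasight/velasight | backend/agent.py | fix_spoken_numbers
-- ===== SOURCE A (Python) =====
-- def fix_spoken_numbers(address_str):
--     """Converts spoken words to digits for Neo4j indexing."""
--     if not address_str: return ""
--     words = address_str.upper().split()
--     num_map = {
--         'ZERO':'0', 'ONE':'1', 'TWO':'2', 'THREE':'3', 'FOUR':'4',
--         'FIVE':'5', 'SIX':'6', 'SEVEN':'7', 'EIGHT':'8', 'NINE':'9',
--         'TWENTY':'20', 'THIRTY':'30', 'FORTY':'40', 'FIFTY':'50', 'SIXTY':'60'
--     }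
--     converted = [num_map.get(w, w) for w in words]
--     final_words = []
--     current_num = ""
--     for w in converted:
--         if w.isdigit():
--             current_num += w
--         else:
--             if current_num:
--                 final_words.append(current_num)
--                 current_num = ""
--             final_words.append(w)
--     if current_num:
--         final_words.append(current_num)
--     return " ".join(final_words)
-- ===== SOURCE B (Python) =====
-- NUM_MAP = {
--     'ZERO': '0', 'ONE': '1', 'TWO': '2', 'THREE': '3', 'FOUR': '4',
--     'FIVE': '5', 'SIX': '6', 'SEVEN': '7', 'EIGHT': '8', 'NINE': '9',
--     'TWENTY': '20', 'THIRTY': '30', 'FORTY': '40', 'FIFTY': '50', 'SIXTY': '60'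
-- }
--
--
-- def _span(pred, ts):
--     """Longest prefix of ts satisfying pred, and the remainder."""
--     i = 0
--     while i < len(ts) and pred(ts[i]):
--         i += 1
--     return ts[:i], ts[i:]
--
--
-- def _render(ts):
--     """Split ts into maximal runs of equal .isdigit(); concatenate digit runs."""
--     out = []
--     while ts:
--         head, p = ts[0], ts[0].isdigit()
--         run, ts = _span(lambda u: u.isdigit() == p, ts[1:])
--         if p:
--             out.append(''.join([head] + run))
--         else:
--             out.extend([head] + run)
--     return out
--
--
-- def fix_spoken_numbers(address_str):
--     """Converts spoken words to digits for Neo4j indexing."""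
--     if not address_str:
--         return ""
--     converted = [NUM_MAP.get(w, w) for w in address_str.upper().split()]
--     return " ".join(_render(converted))
-- ===== Notes on version B (the rewrite author's own statement) =====
-- stated objective: alternative
-- what changed: Replaces A's single-pass flush-on-boundary accumulator loop (current_num string + final_words list) by a recursive decomposition that splits the mapped token list into maximal runs of equal .isdigit() and concatenates each digit run.
import Mathlib
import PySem

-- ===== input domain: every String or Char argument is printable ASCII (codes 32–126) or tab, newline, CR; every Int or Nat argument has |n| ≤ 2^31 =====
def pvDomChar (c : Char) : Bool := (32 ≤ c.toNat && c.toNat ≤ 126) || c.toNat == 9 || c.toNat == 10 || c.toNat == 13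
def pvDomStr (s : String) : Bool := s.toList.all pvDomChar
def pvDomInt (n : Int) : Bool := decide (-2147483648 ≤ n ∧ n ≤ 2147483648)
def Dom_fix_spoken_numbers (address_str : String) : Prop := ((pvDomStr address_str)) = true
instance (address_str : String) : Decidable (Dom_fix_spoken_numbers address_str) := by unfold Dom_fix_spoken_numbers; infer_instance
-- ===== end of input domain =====

-- B replaces A's flush-on-boundary accumulator loop by a recursive split of the token
-- list into maximal runs of equal .isdigit(); digit runs are concatenated. (objective: alternative)

-- ===== PORT A =====
def pvNumMap : PySem.Dict String String := PySem.Dict.ofList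
  [("ZERO","0"), ("ONE","1"), ("TWO","2"), ("THREE","3"), ("FOUR","4"),
   ("FIVE","5"), ("SIX","6"), ("SEVEN","7"), ("EIGHT","8"), ("NINE","9"),
   ("TWENTY","20"), ("THIRTY","30"), ("FORTY","40"), ("FIFTY","50"), ("SIXTY","60")]

def fix_spoken_numbers (address_str : String) : String :=
  if address_str = "" then "" else
  let words := PySem.Str.split₀ (PySem.Str.upper address_str)
  let converted := words.map (fun w => pvNumMap.getD w w)
  let st := converted.foldl
    (fun (st : List String × String) w =>
      if PySem.Str.strIsdigit w then (st.1, st.2 ++ w)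
      else ((if st.2 ≠ "" then st.1 ++ [st.2] else st.1) ++ [w], ""))
    ([], "")
  let final_words := if st.2 ≠ "" then st.1 ++ [st.2] else st.1
  PySem.Str.join " " final_words

-- ===== PORT B =====
-- _span(pred, ts): its while loop computes exactly the longest pred-prefix of ts and
-- the remainder, i.e. (ts.takeWhile pred, ts.dropWhile pred) — exact.
def pvSpan (pred : String → Bool) (ts : List String) : List String × List String :=
  (ts.takeWhile pred, ts.dropWhile pred)

-- _render's while loop: 'out' is the accumulator, ts shrinks to the remainder of its run
def pvRenderLoop (out : List String) : List String → List String
  | [] => out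
  | t :: ts =>
    let p := PySem.Str.strIsdigit t
    let s := pvSpan (fun u => PySem.Str.strIsdigit u == p) ts
    pvRenderLoop (out ++ (if p then [PySem.Str.join "" (t :: s.1)] else t :: s.1)) s.2
termination_by ts => ts.length
decreasing_by
  simp only [pvSpan]
  exact Nat.lt_succ_of_le (List.length_dropWhile_le _ _)

def fix_spoken_numbers_alt (address_str : String) : String :=
  if address_str = "" then "" else
  let converted := (PySem.Str.split₀ (PySem.Str.upper address_str)).map
    (fun w => pvNumMap.getD w w)
  PySem.Str.join " " (pvRenderLoop [] converted)

-- ===== PRECONDITION & SPEC =====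
def Spec_fix_spoken_numbers (address_str : String) (out : String) : Prop := out = fix_spoken_numbers_alt address_str
instance (address_str : String) (out : String) : Decidable (Spec_fix_spoken_numbers address_str out) := by unfold Spec_fix_spoken_numbers; infer_instance

-- ===== CLAIM (what is proved, stated in full; the proofs are below) =====
def Claim_equal_fix_spoken_numbers : Prop := ∀ (address_str : String), Dom_fix_spoken_numbers address_str → Spec_fix_spoken_numbers address_str (fix_spoken_numbers address_str)

-- ===== LEMMAS AND PROOFS =====

-- A's loop step and its end-of-loop flush, named for the proofs
def pvStep (st : List String × String) (w : String) : List String × String :=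
  if PySem.Str.strIsdigit w then (st.1, st.2 ++ w)
  else ((if st.2 ≠ "" then st.1 ++ [st.2] else st.1) ++ [w], "")

def pvFlush (st : List String × String) : List String :=
  if st.2 ≠ "" then st.1 ++ [st.2] else st.1

-- the run-at-a-time result, written as plain recursion: what pvRenderLoop accumulates
def pvRender : List String → List String
  | [] => []
  | t :: ts =>
    let p := PySem.Str.strIsdigit t
    let s := pvSpan (fun u => PySem.Str.strIsdigit u == p) ts
    (if p then [PySem.Str.join "" (t :: s.1)] else t :: s.1) ++ pvRender s.2
termination_by ts => ts.length
decreasing_by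
  simp only [pvSpan]
  exact Nat.lt_succ_of_le (List.length_dropWhile_le _ _)

lemma renderLoop_eq_render (ts : List String) :
    ∀ out, pvRenderLoop out ts = out ++ pvRender ts := by
  induction ts using pvRender.induct with
  | case1 => intro out; simp [pvRenderLoop, pvRender]
  | case2 t ts p s ih =>
    intro out
    rw [pvRenderLoop, pvRender]
    exact (ih _).trans (List.append_assoc _ _ _)

lemma strIsdigit_ne_empty {t : String} (h : PySem.Str.strIsdigit t = true) : t ≠ "" := by
  rintro rfl
  simp [PySem.Str.strIsdigit, PySem.Chars.strIsdigit] at h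

lemma append_ne_empty_left {s t : String} (h : s ≠ "") : s ++ t ≠ "" := by
  intro he
  have hl := congrArg String.toList he
  simp at hl
  exact h hl.1

lemma join_empty_nil : PySem.Str.join "" ([] : List String) = "" := by
  simp [PySem.Str.join, PySem.Chars.join_nil]

lemma join_empty_cons (t : String) (ts : List String) :
    PySem.Str.join "" (t :: ts) = t ++ PySem.Str.join "" ts := by
  cases ts with
  | nil =>
    simp [PySem.Str.join, PySem.Chars.join_singleton, PySem.Chars.join_nil,
      String.ofList_toList]
  | cons u us =>
    have h := PySem.Chars.join_cons_cons ("".toList) t.toList u.toList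
      (us.map String.toList)
    simp only [PySem.Str.join, List.map_cons] at *
    rw [h]
    simp [String.ofList_append, String.ofList_toList]

-- peeling a maximal non-digit run off the front of pvRender is the identity
lemma render_split_false (ts : List String) :
    ts.takeWhile (fun u => PySem.Str.strIsdigit u == false) ++
      pvRender (ts.dropWhile (fun u => PySem.Str.strIsdigit u == false)) = pvRender ts := by
  cases ts with
  | nil => simp [pvRender]
  | cons u us =>
    cases hu : PySem.Str.strIsdigit u with
    | true =>
      have hu' : PySem.Chars.strIsdigit u.toList = true := hu
      simp [hu']
    | false =>
      have hu' : PySem.Chars.strIsdigit u.toList = false := hu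
      conv_rhs => rw [pvRender]
      simp [hu', pvSpan]

lemma render_cons_false {t : String} (ts : List String)
    (h : PySem.Str.strIsdigit t = false) : pvRender (t :: ts) = t :: pvRender ts := by
  rw [pvRender]
  simp only [h, pvSpan, Bool.false_eq_true, if_false]
  rw [List.cons_append, render_split_false]

lemma main_invariant (ts : List String) :
    (∀ fin, pvFlush (ts.foldl pvStep (fin, "")) = fin ++ pvRender ts) ∧ 
    (∀ fin cur, cur ≠ "" →
      pvFlush (ts.foldl pvStep (fin, cur)) =
        fin ++ (cur ++ PySem.Str.join "" (ts.takeWhile (fun u => PySem.Str.strIsdigit u))) ::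
          pvRender (ts.dropWhile (fun u => PySem.Str.strIsdigit u))) := by
  induction ts with
  | nil =>
    constructor
    · intro fin; simp [pvFlush, pvRender]
    · intro fin cur h
      simp [pvFlush, h, pvRender, join_empty_nil]
  | cons t ts ih =>
    obtain ⟨ih1, ih2⟩ := ih
    constructor
    · intro fin
      rw [List.foldl_cons]
      cases hd : PySem.Str.strIsdigit t with
      | false =>
        have hd' : PySem.Chars.strIsdigit t.toList = false := hd
        have hstep : pvStep (fin, "") t = (fin ++ [t], "") := by
          simp [pvStep, hd']
        rw [hstep, ih1, render_cons_false ts hd]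
        simp
      | true =>
        have hd' : PySem.Chars.strIsdigit t.toList = true := hd
        have hstep : pvStep (fin, "") t = (fin, t) := by
          simp [pvStep, hd', String.empty_append]
        rw [hstep, ih2 fin t (strIsdigit_ne_empty hd)]
        conv_rhs => rw [pvRender]
        simp only [pvSpan]
        rw [join_empty_cons]
        simp [hd']
    · intro fin cur hcur
      rw [List.foldl_cons]
      cases hd : PySem.Str.strIsdigit t with
      | true =>
        have hd' : PySem.Chars.strIsdigit t.toList = true := hd
        have hstep : pvStep (fin, cur) t = (fin, cur ++ t) := by
          simp [pvStep, hd']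
        rw [hstep, ih2 fin (cur ++ t) (append_ne_empty_left hcur)]
        simp only [List.takeWhile_cons, List.dropWhile_cons, hd, if_true,
          join_empty_cons, String.append_assoc]
      | false =>
        have hd' : PySem.Chars.strIsdigit t.toList = false := hd
        have hstep : pvStep (fin, cur) t = (fin ++ [cur] ++ [t], "") := by
          simp [pvStep, hd', hcur]
        rw [hstep, ih1]
        simp only [List.takeWhile_cons, List.dropWhile_cons, hd, Bool.false_eq_true,
          if_false, join_empty_nil, String.append_empty]
        rw [render_cons_false ts hd]
        simp

-- ===== VERDICT (by name: the statement is the Claim_ definition above) =====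
theorem fix_spoken_numbers_spec : Claim_equal_fix_spoken_numbers := by
  intro s _
  unfold Spec_fix_spoken_numbers fix_spoken_numbers fix_spoken_numbers_alt
  by_cases hs : s = ""
  · simp [hs]
  · simp only [hs, if_false]
    set converted := (PySem.Str.split₀ (PySem.Str.upper s)).map (fun w => pvNumMap.getD w w)
    have hfold : converted.foldl
        (fun (st : List String × String) w =>
          if PySem.Str.strIsdigit w then (st.1, st.2 ++ w)
          else ((if st.2 ≠ "" then st.1 ++ [st.2] else st.1) ++ [w], "")) ([], "")
        = converted.foldl pvStep ([], "") := rfl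
    rw [hfold]
    have h := (main_invariant converted).1 []
    simp only [pvFlush, List.nil_append] at h
    rw [h, renderLoop_eq_render, List.nil_append]
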